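-- pv_equiv track=rewrite | github.com/SAFUANlip/Yandex-contest | template.py | get_min_changes
-- ===== SOURCE A (Python) =====
-- from typing import List
--
-- def get_min_changes(flights: List[List[int]], source: int, destination: int) -> int:
--     '''
--     Каждый аэропорт иожно считать вершиной, а аэропорты, входящие с ним в одни маршрут будут смежными вершинами.
--
--     Решение будет заключатся в использовании обхода в ширину, для определния необходимого числа самолетов (маршрутов)
--     Один уровень обхода в ширину - + 1 используемый маршрут.
--     Т.к. вершина будет хранить смежные вершины со всех маршрутов, то будут рассмотрены все возможные способы начать
--     полет (т.е. разные начальные маршруты)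
--     '''
--     result = -1
--     if source == destination:
--         return 0
--
--     # сохранение графа в виде массива смежности
--     graph = {}
--     for route in flights:
--         for i in range(len(route)):
--             if route[i] not in graph:
--                 graph[route[i]] = set()
--             graph[route[i]].update(route)
--             graph[route[i]].remove(route[i])
--
--     queue = [(source, 0)]
--     visited = set([source])
--
--     # BFS
--     while queue:
--         current_airport, flights_count = queue.pop(0)
--         if current_airport == destination:
--             return flights_count
--
--         for next_airport in graph.get(current_airport, []):
--             if next_airport not in visited:
--                 visited.add(next_airport)
--                 queue.append((next_airport, flights_count + 1))
--
--     return result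
-- ===== SOURCE B (Python) =====
-- from typing import List
--
-- def get_min_changes(flights: List[List[int]], source: int, destination: int) -> int:
--     # Fixpoint by route activation: no adjacency graph, no queue, no visited/frontier pair.
--     # 'reached' after k rounds = airports reachable using at most k routes; each round scans
--     # the raw routes and absorbs every route that touches the reached set.
--     reached = {source}
--     level = 0
--     while True:
--         if destination in reached:
--             return level
--         expanded = set(reached)
--         for route in flights:
--             if any(a in reached for a in route):
--                 expanded.update(route)
--         if expanded == reached:
--             return -1
--         reached = expanded
--         level += 1
-- ===== Notes on version B (the rewrite author's own statement) =====
-- stated objective: faster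
-- what changed: Drops A's adjacency-dict construction (which materialises a clique per route) and its BFS queue/visited set entirely; B computes the answer as a fixpoint of route activation, repeatedly absorbing every raw route that touches the reached set and counting the rounds until the destination is absorbed or the set stops growing.
import Mathlib
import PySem

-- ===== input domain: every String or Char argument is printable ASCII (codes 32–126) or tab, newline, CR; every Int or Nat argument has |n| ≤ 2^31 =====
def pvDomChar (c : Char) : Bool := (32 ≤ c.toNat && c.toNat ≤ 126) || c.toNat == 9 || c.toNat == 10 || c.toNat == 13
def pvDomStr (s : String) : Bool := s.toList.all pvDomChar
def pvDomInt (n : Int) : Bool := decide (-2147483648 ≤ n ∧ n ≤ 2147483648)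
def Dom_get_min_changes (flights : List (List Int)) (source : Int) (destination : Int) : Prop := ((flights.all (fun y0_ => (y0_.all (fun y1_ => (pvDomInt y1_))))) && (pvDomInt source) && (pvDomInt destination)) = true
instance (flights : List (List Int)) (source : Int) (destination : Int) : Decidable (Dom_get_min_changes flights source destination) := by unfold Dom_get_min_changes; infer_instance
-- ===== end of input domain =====

-- B drops A's adjacency-dict + BFS queue entirely and instead iterates a route-activation
-- fixpoint (absorb every raw route touching the reached set, count the rounds); alternative
-- algorithmic decomposition, same result.

-- ===== PORT A =====
-- graph construction: for route in flights: for a in route: setdefault-to-∅, update(route), remove(a)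
-- (Python's set.remove raises when the element is absent; here `a ∈ route` makes it always present, so remove = discard, exact)
def pvGraphA (flights : List (List Int)) : PySem.Dict Int (PySem.Set Int) :=
  flights.foldl (fun g route =>
    route.foldl (fun g a =>
      let g1 := if g.contains a then g else g.insert a PySem.Set.empty
      g1.insert a (PySem.Set.discard (PySem.Set.update (g1.getD a PySem.Set.empty) route) a)) g)
    PySem.Dict.empty

-- graph.get(u, [])
def pvAdj (g : PySem.Dict Int (PySem.Set Int)) (u : Int) : PySem.Set Int :=
  (g.get? u).getD PySem.Set.empty

-- all airports stored as neighbours anywhere in g (used only for the termination measure)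
def pvU (g : PySem.Dict Int (PySem.Set Int)) : List Int := g.values.flatten

def pvMeas (g : PySem.Dict Int (PySem.Set Int)) (v : List Int) : Nat :=
  ((pvU g).toFinset \ v.toFinset).card

-- the new nodes a visited-guarded scan of `adj` discovers starting from visited set v (proof/termination helper)
def pvNew (adj : List Int) (v : List Int) : List Int :=
  match adj with
  | [] => []
  | w :: ws => if PySem.Set.contains v w then pvNew ws v else w :: pvNew ws (v ++ [w])

-- facts cited by the ports' decreasing_by proofs (must precede the ports)
theorem pvNew_mem : ∀ (adj v : List Int) (w : Int), w ∈ pvNew adj v → w ∈ adj ∧ w ∉ v := by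
  intro adj
  induction adj with
  | nil => intro v w h; simp [pvNew] at h
  | cons x xs ih =>
    intro v w h
    by_cases hx : PySem.Set.contains v x
    · simp only [pvNew, hx, if_pos] at h
      have := ih v w h
      exact ⟨List.mem_cons_of_mem _ this.1, this.2⟩
    · simp only [pvNew, hx, Bool.false_eq_true, if_neg, not_false_iff] at h
      rcases List.mem_cons.mp h with h | h
      · subst h
        refine ⟨List.mem_cons_self, ?_⟩
        simpa [PySem.Set.contains, List.contains_iff_mem] using hx
      · have := ih (v ++ [x]) w h
        exact ⟨List.mem_cons_of_mem _ this.1, fun hw => this.2 (List.mem_append_left _ hw)⟩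

theorem pvNew_nodup : ∀ (adj v : List Int), (pvNew adj v).Nodup := by
  intro adj
  induction adj with
  | nil => intro v; simp [pvNew]
  | cons x xs ih =>
    intro v
    by_cases hx : PySem.Set.contains v x
    · simp only [pvNew, hx, if_pos]
      exact ih v
    · simp only [pvNew, hx, Bool.false_eq_true, if_neg, not_false_iff]
      refine List.nodup_cons.mpr ⟨?_, ih (v ++ [x])⟩
      intro hmem
      exact (pvNew_mem xs (v ++ [x]) x hmem).2 (List.mem_append_right _ List.mem_cons_self)

theorem pvAdj_subset (g : PySem.Dict Int (PySem.Set Int)) (u : Int) :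
    ∀ w ∈ pvAdj g u, w ∈ pvU g := by
  intro w hw
  unfold pvAdj at hw
  cases h : g.get? u with
  | none => rw [h] at hw; simp [PySem.Set.empty] at hw
  | some s =>
    rw [h] at hw
    simp only [Option.getD_some] at hw
    unfold PySem.Dict.get? at h
    rcases Option.map_eq_some_iff.mp h with ⟨p, hp, hps⟩
    have hmem : p ∈ g.items := List.mem_of_find?_eq_some hp
    subst hps
    exact List.mem_flatten.mpr ⟨p.2, List.mem_map_of_mem hmem, hw⟩

theorem pvMeas_drop (g : PySem.Dict Int (PySem.Set Int)) (v new : List Int)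
    (hnd : new.Nodup) (hmem : ∀ w ∈ new, w ∈ pvU g ∧ w ∉ v) :
    pvMeas g (v ++ new) + new.length = pvMeas g v := by
  unfold pvMeas
  have hsub : new.toFinset ⊆ (pvU g).toFinset \ v.toFinset := by
    intro w hw
    have hw' := List.mem_toFinset.mp hw
    rcases hmem w hw' with ⟨h1, h2⟩
    exact Finset.mem_sdiff.mpr ⟨List.mem_toFinset.mpr h1, fun hc => h2 (List.mem_toFinset.mp hc)⟩
  have hset : (pvU g).toFinset \ (v ++ new).toFinset = ((pvU g).toFinset \ v.toFinset) \ new.toFinset := by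
    ext w
    simp only [Finset.mem_sdiff, List.mem_toFinset, List.mem_append]
    tauto
  rw [hset, Finset.card_sdiff_of_subset hsub, List.toFinset_card_of_nodup hnd]
  refine Nat.sub_add_cancel ?_
  rw [← List.toFinset_card_of_nodup hnd]
  exact Finset.card_le_card hsub

-- the visited-guarded neighbour scan of A's inner loop (characterisation cited by decreasing_by)
theorem pvFoldA_spec (d : Int) : ∀ (adj v : List Int) (q : List (Int × Int)),
    adj.foldl (fun s w => if PySem.Set.contains s.1 w then s else (PySem.Set.add s.1 w, s.2 ++ [(w, d + 1)])) (v, q)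
      = (v ++ pvNew adj v, q ++ (pvNew adj v).map (fun w => (w, d + 1))) := by
  intro adj
  induction adj with
  | nil => intro v q; simp [pvNew]
  | cons x xs ih =>
    intro v q
    by_cases hx : PySem.Set.contains v x
    · simp only [List.foldl_cons, hx, if_pos, pvNew]
      exact ih v q
    · simp only [List.foldl_cons, hx, Bool.false_eq_true, if_neg, not_false_iff, pvNew]
      have hadd : PySem.Set.add v x = v ++ [x] := by simp [PySem.Set.add, PySem.Set.contains] at hx ⊢; simp [hx]
      rw [hadd, ih (v ++ [x]) (q ++ [(x, d + 1)])]
      simp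

-- the inner for-loop of A's BFS body, as a helper (scan u's neighbours, extending visited and the queue)
def pvStepA (g : PySem.Dict Int (PySem.Set Int)) (u : Int) (v : PySem.Set Int) (rest : List (Int × Int)) (d : Int) :
    PySem.Set Int × List (Int × Int) :=
  (pvAdj g u).foldl
    (fun s w => if PySem.Set.contains s.1 w then s else (PySem.Set.add s.1 w, s.2 ++ [(w, d + 1)])) (v, rest)

theorem pvStepA_spec (g : PySem.Dict Int (PySem.Set Int)) (u : Int) (v : PySem.Set Int) (rest : List (Int × Int)) (d : Int) :
    pvStepA g u v rest d = (v ++ pvNew (pvAdj g u) v, rest ++ (pvNew (pvAdj g u) v).map (fun w => (w, d + 1))) :=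
  pvFoldA_spec d (pvAdj g u) v rest

-- A's BFS loop: a queue of (airport, flights_count) pairs and a visited set
def pvBfsA (g : PySem.Dict Int (PySem.Set Int)) (dest : Int) (q : List (Int × Int)) (v : PySem.Set Int) : Int :=
  match q with
  | [] => -1
  | (u, d) :: rest =>
    if u = dest then d
    else
      let st := pvStepA g u v rest d
      pvBfsA g dest st.2 st.1
termination_by 2 * pvMeas g v + q.length
decreasing_by
  rw [pvStepA_spec]
  have hd := pvMeas_drop g v (pvNew (pvAdj g u) v) (pvNew_nodup _ _)
    (fun w hw => ⟨pvAdj_subset g u w (pvNew_mem _ _ _ hw).1, (pvNew_mem _ _ _ hw).2⟩)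
  simp only [List.length_append, List.length_map, List.length_cons]
  omega

def get_min_changes (flights : List (List Int)) (source : Int) (destination : Int) : Int :=
  if source = destination then 0
  else pvBfsA (pvGraphA flights) destination [(source, 0)] (PySem.Set.ofList [source])

-- ===== PORT B =====
-- one round of Source B's inner for-loop: expanded = set(reached); absorb every route touching reached
def pvExpand (flights : List (List Int)) (reached : PySem.Set Int) : PySem.Set Int :=
  flights.foldl (fun expanded route =>
    if route.any (fun a => PySem.Set.contains reached a) then PySem.Set.update expanded route
    else expanded) reached

-- membership in one expansion round (cited by pvClosure's decreasing_by and by the proofs)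
theorem pvExpandAux_mem : ∀ (fs : List (List Int)) (R e : PySem.Set Int) (x : Int),
    (x ∈ fs.foldl (fun expanded route =>
        if route.any (fun a => PySem.Set.contains R a) then PySem.Set.update expanded route
        else expanded) e)
      ↔ (x ∈ e ∨ ∃ r ∈ fs, (∃ a ∈ r, a ∈ R) ∧ x ∈ r) := by
  intro fs
  induction fs with
  | nil => intro R e x; simp
  | cons route fs' ih =>
    intro R e x
    rw [List.foldl_cons]
    by_cases hact : route.any (fun a => PySem.Set.contains R a) = true
    · rw [if_pos hact, ih]
      have htouch : ∃ a ∈ route, a ∈ R := by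
        rcases List.any_eq_true.mp hact with ⟨a, ha, hc⟩
        exact ⟨a, ha, (PySem.Set.contains_iff _ _).mp hc⟩
      simp only [PySem.Set.mem_update, List.exists_mem_cons_iff]
      constructor
      · rintro ((h | h) | h)
        · exact Or.inl h
        · exact Or.inr (Or.inl ⟨htouch, h⟩)
        · exact Or.inr (Or.inr h)
      · rintro (h | ⟨_, h⟩ | h)
        · exact Or.inl (Or.inl h)
        · exact Or.inl (Or.inr h)
        · exact Or.inr h
    · rw [if_neg hact, ih]
      have hnt : ¬ ∃ a ∈ route, a ∈ R := by
        intro ⟨a, ha, haR⟩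
        exact hact (List.any_eq_true.mpr ⟨a, ha, (PySem.Set.contains_iff _ _).mpr haR⟩)
      simp only [List.exists_mem_cons_iff]
      constructor
      · rintro (h | h)
        · exact Or.inl h
        · exact Or.inr (Or.inr h)
      · rintro (h | ⟨ht, _⟩ | h)
        · exact Or.inl h
        · exact absurd ht hnt
        · exact Or.inr h

-- Source B's while-loop: absorb routes until the destination is reached or the set stops growing
def pvClosure (flights : List (List Int)) (dest : Int) (reached : PySem.Set Int) (level : Int) : Int :=
  if PySem.Set.contains reached dest then level
  else
    let expanded := pvExpand flights reached
    if PySem.Set.equal expanded reached then -1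
    else pvClosure flights dest expanded (level + 1)
termination_by ((flights.flatten).toFinset \ reached.toFinset).card
decreasing_by
  rename_i heq
  have hmem : ∀ x, x ∈ pvExpand flights reached ↔
      x ∈ reached ∨ ∃ r ∈ flights, (∃ a ∈ r, a ∈ reached) ∧ x ∈ r :=
    fun x => pvExpandAux_mem flights reached reached x
  have hx : ∃ x, x ∈ pvExpand flights reached ∧ x ∉ reached := by
    by_contra hno
    apply heq
    rw [PySem.Set.equal_iff]
    intro x
    refine ⟨fun h => ?_, fun h => (hmem x).mpr (Or.inl h)⟩
    by_contra hxo
    exact hno ⟨x, h, hxo⟩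
  rcases hx with ⟨x, hxE, hxR⟩
  have hxF : x ∈ flights.flatten := by
    rcases (hmem x).mp hxE with h | ⟨r, hr, _, hxr⟩
    · exact absurd h hxR
    · exact List.mem_flatten.mpr ⟨r, hr, hxr⟩
  apply Finset.card_lt_card
  refine ⟨fun y hy => ?_, fun hsub => ?_⟩
  · rcases Finset.mem_sdiff.mp hy with ⟨hyf, hyE⟩
    refine Finset.mem_sdiff.mpr ⟨hyf, fun hyR => hyE ?_⟩
    exact List.mem_toFinset.mpr ((hmem y).mpr (Or.inl (List.mem_toFinset.mp hyR)))
  · have : x ∈ flights.flatten.toFinset \ (pvExpand flights reached).toFinset :=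
      hsub (Finset.mem_sdiff.mpr ⟨List.mem_toFinset.mpr hxF,
        fun hc => hxR (List.mem_toFinset.mp hc)⟩)
    exact (Finset.mem_sdiff.mp this).2 (List.mem_toFinset.mpr hxE)

def get_min_changes_alt (flights : List (List Int)) (source : Int) (destination : Int) : Int :=
  pvClosure flights destination (PySem.Set.ofList [source]) 0

-- ===== PRECONDITION & SPEC =====
def Spec_get_min_changes (flights : List (List Int)) (source : Int) (destination : Int) (out : Int) : Prop := out = get_min_changes_alt flights source destination
instance (flights : List (List Int)) (source : Int) (destination : Int) (out : Int) : Decidable (Spec_get_min_changes flights source destination out) := by unfold Spec_get_min_changes; infer_instance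

-- ===== CLAIM (what is proved, stated in full; the proofs are below) =====
def Claim_equal_get_min_changes : Prop := ∀ (flights : List (List Int)) (source : Int) (destination : Int), Dom_get_min_changes flights source destination → Spec_get_min_changes flights source destination (get_min_changes flights source destination)

-- ===== LEMMAS AND PROOFS =====

-- proof-side level-synchronous reformulation of A's BFS (used only to bridge A to B)
theorem pvFoldB_spec : ∀ (adj v next : List Int),
    adj.foldl (fun s w => if PySem.Set.contains s.1 w then s else (PySem.Set.add s.1 w, s.2 ++ [w])) (v, next)
      = (v ++ pvNew adj v, next ++ pvNew adj v) := by
  intro adj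
  induction adj with
  | nil => intro v next; simp [pvNew]
  | cons x xs ih =>
    intro v next
    by_cases hx : PySem.Set.contains v x
    · simp only [List.foldl_cons, hx, if_pos, pvNew]
      exact ih v next
    · simp only [List.foldl_cons, hx, Bool.false_eq_true, if_neg, not_false_iff, pvNew]
      have hadd : PySem.Set.add v x = v ++ [x] := by simp [PySem.Set.add, PySem.Set.contains] at hx ⊢; simp [hx]
      rw [hadd, ih (v ++ [x]) (next ++ [x])]
      simp

theorem pvNew_append : ∀ (xs ys v : List Int),
    pvNew (xs ++ ys) v = pvNew xs v ++ pvNew ys (v ++ pvNew xs v) := by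
  intro xs
  induction xs with
  | nil => intro ys v; simp [pvNew]
  | cons x xs' ih =>
    intro ys v
    by_cases hx : PySem.Set.contains v x
    · simp only [List.cons_append, pvNew, hx, if_pos]
      exact ih ys v
    · simp only [List.cons_append, pvNew, hx, Bool.false_eq_true, if_neg, not_false_iff]
      rw [ih ys (v ++ [x])]
      simp

theorem pvFoldB2_spec (g : PySem.Dict Int (PySem.Set Int)) : ∀ (F v next : List Int),
    F.foldl (fun s u => (pvAdj g u).foldl
        (fun s w => if PySem.Set.contains s.1 w then s else (PySem.Set.add s.1 w, s.2 ++ [w])) s) (v, next)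
      = (v ++ pvNew (F.flatMap (pvAdj g)) v, next ++ pvNew (F.flatMap (pvAdj g)) v) := by
  intro F
  induction F with
  | nil => intro v next; simp [pvNew]
  | cons u F' ih =>
    intro v next
    simp only [List.foldl_cons, pvFoldB_spec, List.flatMap_cons, pvNew_append]
    rw [ih (v ++ pvNew (pvAdj g u) v) (next ++ pvNew (pvAdj g u) v)]
    simp

def pvStepB (g : PySem.Dict Int (PySem.Set Int)) (frontier : List Int) (v : PySem.Set Int) :
    PySem.Set Int × List Int :=
  frontier.foldl (fun s u => (pvAdj g u).foldl
      (fun s w => if PySem.Set.contains s.1 w then s else (PySem.Set.add s.1 w, s.2 ++ [w])) s) (v, ([] : List Int))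

theorem pvStepB_spec (g : PySem.Dict Int (PySem.Set Int)) (frontier : List Int) (v : PySem.Set Int) :
    pvStepB g frontier v
      = (v ++ pvNew (frontier.flatMap (pvAdj g)) v, pvNew (frontier.flatMap (pvAdj g)) v) := by
  unfold pvStepB
  rw [pvFoldB2_spec]
  simp

def pvBfsB (g : PySem.Dict Int (PySem.Set Int)) (dest : Int) (frontier : List Int) (v : PySem.Set Int) (level : Int) : Int :=
  if frontier = [] then -1
  else if frontier.contains dest then level
  else
    let st := pvStepB g frontier v
    pvBfsB g dest st.2 st.1 (level + 1)
termination_by 2 * pvMeas g v + frontier.length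
decreasing_by
  rw [pvStepB_spec]
  dsimp only
  have hd := pvMeas_drop g v (pvNew (frontier.flatMap (pvAdj g)) v) (pvNew_nodup _ _)
    (fun w hw => ⟨by
        rcases List.mem_flatMap.mp (pvNew_mem _ _ _ hw).1 with ⟨u, _, hu⟩
        exact pvAdj_subset g u w hu,
      (pvNew_mem _ _ _ hw).2⟩)
  have hne : frontier.length ≠ 0 := by
    simpa [List.length_eq_zero_iff] using ‹¬ frontier = []›
  omega

-- If the destination sits in the level-d block at the head of A's queue, A returns d.
theorem pvBfsA_of_mem (g : PySem.Dict Int (PySem.Set Int)) (dest : Int) :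
    ∀ (F : List Int) (G : List (Int × Int)) (v : List Int) (d : Int), dest ∈ F →
      pvBfsA g dest (F.map (fun a => (a, d)) ++ G) v = d := by
  intro F
  induction F with
  | nil => intro G v d h; simp at h
  | cons u F' ih =>
    intro G v d h
    simp only [List.map_cons, List.cons_append]
    rw [pvBfsA]
    by_cases hu : u = dest
    · simp [hu]
    · have hmem : dest ∈ F' := by
        rcases List.mem_cons.mp h with h | h
        · exact absurd h.symm hu
        · exact h
      simp only [hu, if_neg, not_false_iff, pvStepA_spec]
      rw [List.append_assoc]
      exact ih (G ++ (pvNew (pvAdj g u) v).map (fun w => (w, d + 1))) (v ++ pvNew (pvAdj g u) v) d hmem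

-- Processing a whole level of A's queue that misses the destination turns the queue into the next level.
theorem pvBfsA_level (g : PySem.Dict Int (PySem.Set Int)) (dest : Int) :
    ∀ (F G : List Int) (v : List Int) (d : Int), dest ∉ F →
      pvBfsA g dest (F.map (fun a => (a, d)) ++ G.map (fun a => (a, d + 1))) v
        = pvBfsA g dest ((G ++ pvNew (F.flatMap (pvAdj g)) v).map (fun a => (a, d + 1)))
            (v ++ pvNew (F.flatMap (pvAdj g)) v) := by
  intro F
  induction F with
  | nil => intro G v d _; simp [pvNew]
  | cons u F' ih =>
    intro G v d h
    have hu : ¬ u = dest := fun hc => h (by simp [hc])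
    have h' : dest ∉ F' := fun hc => h (List.mem_cons_of_mem _ hc)
    simp only [List.map_cons, List.cons_append]
    rw [pvBfsA]
    simp only [hu, if_neg, not_false_iff, pvStepA_spec]
    have hq : F'.map (fun a => (a, d)) ++ G.map (fun a => (a, d + 1))
        ++ (pvNew (pvAdj g u) v).map (fun w => (w, d + 1))
        = F'.map (fun a => (a, d)) ++ (G ++ pvNew (pvAdj g u) v).map (fun a => (a, d + 1)) := by
      simp
    rw [hq, ih (G ++ pvNew (pvAdj g u) v) (v ++ pvNew (pvAdj g u) v) d h']
    rw [List.flatMap_cons, pvNew_append]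
    simp

-- A's queue BFS started on one level equals the level-synchronous reformulation.
theorem pvBfs_bridge (g : PySem.Dict Int (PySem.Set Int)) (dest : Int) :
    ∀ (n : Nat) (F v : List Int) (d : Int), 2 * pvMeas g v + F.length ≤ n →
      pvBfsA g dest (F.map (fun a => (a, d))) v = pvBfsB g dest F v d := by
  intro n
  induction n using Nat.strong_induction_on with
  | _ n ih =>
    intro F v d hn
    match F with
    | [] =>
      simp only [List.map_nil]
      rw [pvBfsA, pvBfsB.eq_def]
      simp
    | u :: F' =>
      rw [pvBfsB.eq_def]
      simp only [reduceCtorEq, if_neg, not_false_iff]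
      by_cases hdest : (u :: F').contains dest
      · have hmem : dest ∈ u :: F' := by simpa [List.contains_iff_mem] using hdest
        rw [if_pos hdest]
        have := pvBfsA_of_mem g dest (u :: F') [] v d hmem
        simpa using this
      · have hmem : dest ∉ u :: F' := by simpa [List.contains_iff_mem] using hdest
        rw [if_neg hdest]
        simp only [pvStepB_spec]
        have hA : (u :: F').map (fun a => (a, d)) = (u :: F').map (fun a => (a, d)) ++ ([] : List Int).map (fun a => (a, d + 1)) := by simp
        rw [hA, pvBfsA_level g dest (u :: F') [] v d hmem]
        simp only [List.nil_append]
        set N := pvNew ((u :: F').flatMap (pvAdj g)) v with hN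
        have hd := pvMeas_drop g v N (pvNew_nodup _ _)
          (fun w hw => ⟨by
              rcases List.mem_flatMap.mp (pvNew_mem _ _ _ hw).1 with ⟨x, _, hx⟩
              exact pvAdj_subset g x w hx,
            (pvNew_mem _ _ _ hw).2⟩)
        have hlt : 2 * pvMeas g (v ++ N) + N.length < n := by
          simp only [List.length_cons] at hn
          omega
        exact ih (2 * pvMeas g (v ++ N) + N.length) hlt N (v ++ N) (d + 1) le_rfl

-- full membership characterisation of pvNew (the visited-guarded scan keeps exactly the unvisited)
theorem pvNew_mem_iff : ∀ (adj v : List Int) (x : Int), x ∈ pvNew adj v ↔ x ∈ adj ∧ x ∉ v := by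
  intro adj
  induction adj with
  | nil => intro v x; simp [pvNew]
  | cons a ws ih =>
    intro v x
    by_cases ha : PySem.Set.contains v a
    · have hav : a ∈ v := (PySem.Set.contains_iff _ _).mp ha
      simp only [pvNew, ha, if_pos, ih, List.mem_cons]
      constructor
      · rintro ⟨h1, h2⟩; exact ⟨Or.inr h1, h2⟩
      · rintro ⟨h1 | h1, h2⟩
        · exact absurd (h1 ▸ hav) h2
        · exact ⟨h1, h2⟩
    · have hav : a ∉ v := fun h => ha ((PySem.Set.contains_iff _ _).mpr h)
      simp only [pvNew, ha, Bool.false_eq_true, if_neg, not_false_iff, List.mem_cons, ih,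
        List.mem_append]
      by_cases hxa : x = a
      · subst hxa; tauto
      · tauto

-- value stored at key u after one step of A's graph-building inner loop
theorem pvBody_getD (g : PySem.Dict Int (PySem.Set Int)) (a u : Int) (route : List Int) :
    ((let g1 := if g.contains a then g else g.insert a PySem.Set.empty
      g1.insert a (PySem.Set.discard (PySem.Set.update (g1.getD a PySem.Set.empty) route) a)).getD u PySem.Set.empty)
    = if u = a then PySem.Set.discard (PySem.Set.update (g.getD a PySem.Set.empty) route) a
      else g.getD u PySem.Set.empty := by
  by_cases hc : g.contains a
  · simp [hc, PySem.Dict.getD_insert]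
  · have h0 : g.getD a ([] : PySem.Set Int) = [] :=
      PySem.Dict.getD_of_not_contains g _ (by simpa using hc)
    by_cases hua : u = a
    · simp [hc, hua, h0]
    · simp [hc, PySem.Dict.getD_insert, hua]

-- membership at key u after A's inner loop over r (updating with the fixed list `route`)
theorem pvInnerMem (route : List Int) : ∀ (r : List Int) (g : PySem.Dict Int (PySem.Set Int)) (u w : Int),
    (w ∈ (r.foldl (fun g a =>
        let g1 := if g.contains a then g else g.insert a PySem.Set.empty
        g1.insert a (PySem.Set.discard (PySem.Set.update (g1.getD a PySem.Set.empty) route) a)) g).getD u PySem.Set.empty)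
    ↔ (if u ∈ r then ((w ∈ g.getD u PySem.Set.empty ∨ w ∈ route) ∧ w ≠ u)
       else w ∈ g.getD u PySem.Set.empty) := by
  intro r
  induction r with
  | nil => intro g u w; simp
  | cons a r' ih =>
    intro g u w
    rw [List.foldl_cons, ih, pvBody_getD]
    by_cases hua : u = a
    · subst hua
      by_cases hur : u ∈ r'
      · simp [hur, PySem.Set.mem_discard, PySem.Set.mem_update, List.mem_cons]
        tauto
      · simp [hur, PySem.Set.mem_discard, PySem.Set.mem_update, List.mem_cons]
    · by_cases hur : u ∈ r' <;>
        simp [hur, hua, List.mem_cons]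

-- membership in A's finished adjacency dict, over the whole outer loop
theorem pvOuterMem : ∀ (fs : List (List Int)) (g : PySem.Dict Int (PySem.Set Int)),
    (∀ u : Int, u ∉ g.getD u PySem.Set.empty) → ∀ (u w : Int),
    (w ∈ (fs.foldl (fun g route =>
        route.foldl (fun g a =>
          let g1 := if g.contains a then g else g.insert a PySem.Set.empty
          g1.insert a (PySem.Set.discard (PySem.Set.update (g1.getD a PySem.Set.empty) route) a)) g) g).getD u PySem.Set.empty)
    ↔ (w ∈ g.getD u PySem.Set.empty ∨ ∃ r ∈ fs, u ∈ r ∧ w ∈ r ∧ w ≠ u) := by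
  intro fs
  induction fs with
  | nil => intro g _ u w; simp
  | cons route fs' ih =>
    intro g hg u w
    rw [List.foldl_cons]
    have hg' : ∀ u : Int, u ∉ (route.foldl (fun g a =>
        let g1 := if g.contains a then g else g.insert a PySem.Set.empty
        g1.insert a (PySem.Set.discard (PySem.Set.update (g1.getD a PySem.Set.empty) route) a)) g).getD u PySem.Set.empty := by
      intro u
      rw [pvInnerMem]
      by_cases hur : u ∈ route
      · rw [if_pos hur]; simp
      · rw [if_neg hur]; exact hg u
    rw [ih _ hg', pvInnerMem]
    simp only [List.exists_mem_cons_iff]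
    by_cases hur : u ∈ route
    · rw [if_pos hur]
      by_cases hwu : w = u
      · subst hwu
        have := hg w
        tauto
      · tauto
    · rw [if_neg hur]
      tauto

-- A's adjacency of u = the airports sharing a route with u, minus u itself
theorem pvAdjGraph_iff (flights : List (List Int)) (u w : Int) :
    w ∈ pvAdj (pvGraphA flights) u ↔ ∃ r ∈ flights, u ∈ r ∧ w ∈ r ∧ w ≠ u := by
  have h := pvOuterMem flights PySem.Dict.empty (by simp) u w
  unfold pvAdj
  rw [← PySem.Dict.getD_eq_get?_getD]
  unfold pvGraphA
  simpa using h

-- The new bridge: A's level BFS over the clique graph equals B's route-activation closure.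
theorem pvBridge2 (flights : List (List Int)) (dest : Int) :
    ∀ (n : Nat) (F v R : List Int) (d : Int),
      2 * pvMeas (pvGraphA flights) v + F.length ≤ n →
      (∀ x, x ∈ v ↔ x ∈ R) →
      (∀ x ∈ F, x ∈ v) →
      (∀ u, u ∈ v → u ∉ F → ∀ w ∈ pvAdj (pvGraphA flights) u, w ∈ v) →
      (dest ∈ v → dest ∈ F) →
      pvBfsB (pvGraphA flights) dest F v d = pvClosure flights dest R d := by
  intro n
  induction n using Nat.strong_induction_on with
  | _ n ih =>
    intro F v R d hn hiff hFv hclosed hdf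
    by_cases hdR : dest ∈ R
    · have hdF : dest ∈ F := hdf ((hiff dest).mpr hdR)
      have hF0 : F ≠ [] := fun h => by simp [h] at hdF
      rw [pvBfsB.eq_def, pvClosure]
      simp [hF0, hdF, hdR]
    · have hdv : dest ∉ v := fun h => hdR ((hiff dest).mp h)
      have hdF : dest ∉ F := fun h => hdv (hFv dest h)
      have hcR : ¬ PySem.Set.contains R dest = true := fun h => hdR ((PySem.Set.contains_iff _ _).mp h)
      set g := pvGraphA flights with hgdef
      set N := pvNew (F.flatMap (pvAdj g)) v with hNdef
      have hsetEq : ∀ x, x ∈ pvExpand flights R ↔ x ∈ v ∨ x ∈ N := by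
        intro x
        unfold pvExpand
        rw [pvExpandAux_mem, hNdef, pvNew_mem_iff]
        constructor
        · rintro (hxR | ⟨r, hr, ⟨a, har, haR⟩, hxr⟩)
          · exact Or.inl ((hiff x).mpr hxR)
          · have hav : a ∈ v := (hiff a).mpr haR
            by_cases hxv : x ∈ v
            · exact Or.inl hxv
            · have hxa : x ≠ a := fun h => hxv (h ▸ hav)
              have hxadj : x ∈ pvAdj g a := (pvAdjGraph_iff flights a x).mpr ⟨r, hr, har, hxr, hxa⟩
              by_cases haF : a ∈ F
              · exact Or.inr ⟨List.mem_flatMap.mpr ⟨a, haF, hxadj⟩, hxv⟩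
              · exact absurd (hclosed a hav haF x hxadj) hxv
        · rintro (hxv | ⟨hxfm, hxv⟩)
          · exact Or.inl ((hiff x).mp hxv)
          · rcases List.mem_flatMap.mp hxfm with ⟨u, huF, hxadj⟩
            rcases (pvAdjGraph_iff flights u x).mp hxadj with ⟨r, hr, hur, hxr, hxu⟩
            exact Or.inr ⟨r, hr, ⟨u, hur, (hiff u).mp (hFv u huF)⟩, hxr⟩
      by_cases hF0 : F = []
      · subst hF0
        have hN0 : N = [] := by simp [hNdef, pvNew]
        rw [pvBfsB.eq_def, pvClosure]
        have heq : PySem.Set.equal (pvExpand flights R) R = true := by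
          rw [PySem.Set.equal_iff]
          intro x
          rw [hsetEq x, hN0]
          simp [hiff x]
        simp [hdR, heq]
      · have hNsub : ∀ x ∈ N, x ∈ F.flatMap (pvAdj g) ∧ x ∉ v := by
          intro x hx; rw [hNdef] at hx; exact (pvNew_mem_iff _ _ _).mp hx
        rw [pvBfsB.eq_def, pvClosure]
        dsimp only
        have hcF : ¬ (F.contains dest = true) := by
          simp [hdF]
        rw [if_neg hF0, if_neg hcF, if_neg hcR, pvStepB_spec]
        dsimp only
        rw [← hNdef]
        by_cases hN0 : N = []
        · have heq : PySem.Set.equal (pvExpand flights R) R = true := by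
            rw [PySem.Set.equal_iff]
            intro x
            rw [hsetEq x, hN0]
            simp [hiff x]
          rw [if_pos heq, hN0, pvBfsB.eq_def]
          simp
        · have heq : ¬ PySem.Set.equal (pvExpand flights R) R = true := by
            intro hc
            rcases List.exists_mem_of_ne_nil N hN0 with ⟨x, hxN⟩
            have hxE : x ∈ pvExpand flights R := (hsetEq x).mpr (Or.inr hxN)
            have hxv : x ∉ v := (hNsub x hxN).2
            have hxR : x ∈ R := ((PySem.Set.equal_iff _ _).mp hc x).mp hxE
            exact hxv ((hiff x).mpr hxR)
          rw [if_neg heq]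
          have hd := pvMeas_drop g v N (hNdef ▸ pvNew_nodup _ _)
            (fun w hw => ⟨by
                rcases List.mem_flatMap.mp (hNsub w hw).1 with ⟨u, _, hu⟩
                exact pvAdj_subset g u w hu,
              (hNsub w hw).2⟩)
          have hFlen : F.length ≠ 0 := by simpa [List.length_eq_zero_iff] using hF0
          have hlt : 2 * pvMeas g (v ++ N) + N.length < n := by omega
          apply ih _ hlt N (v ++ N) (pvExpand flights R) (d + 1) le_rfl
          · intro x
            rw [List.mem_append, hsetEq x]
          · intro x hx
            exact List.mem_append.mpr (Or.inr hx)
          · intro u hu huN w hw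
            rcases List.mem_append.mp hu with huv | huN'
            · by_cases huF : u ∈ F
              · by_cases hwv : w ∈ v
                · exact List.mem_append.mpr (Or.inl hwv)
                · refine List.mem_append.mpr (Or.inr ?_)
                  rw [hNdef, pvNew_mem_iff]
                  exact ⟨List.mem_flatMap.mpr ⟨u, huF, hw⟩, hwv⟩
              · exact List.mem_append.mpr (Or.inl (hclosed u huv huF w hw))
            · exact absurd huN' huN
          · intro hdvn
            rcases List.mem_append.mp hdvn with h | h
            · exact absurd h hdv
            · exact h

-- ===== VERDICT (by name: the statement is the Claim_ definition above) =====
theorem get_min_changes_spec : Claim_equal_get_min_changes := by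
  intro flights source destination _
  unfold Spec_get_min_changes get_min_changes get_min_changes_alt
  by_cases h : source = destination
  · subst h
    rw [if_pos rfl, pvClosure]
    have hc : PySem.Set.contains (PySem.Set.ofList [source]) source = true := by
      rw [PySem.Set.contains_iff, PySem.Set.mem_ofList]
      exact List.mem_singleton.mpr rfl
    rw [if_pos hc]
  · rw [if_neg h]
    have hof : PySem.Set.ofList [source] = [source] := rfl
    have h1 := pvBfs_bridge (pvGraphA flights) destination
      (2 * pvMeas (pvGraphA flights) [source] + 1) [source] [source] 0 (by simp)
    have h2 := pvBridge2 flights destination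
      (2 * pvMeas (pvGraphA flights) [source] + 1) [source] [source] [source] 0 (by simp)
      (fun x => Iff.rfl) (fun x hx => hx)
      (fun u hu huF _ _ => absurd hu huF) (fun hd => hd)
    rw [hof]
    simp only [List.map_cons, List.map_nil] at h1
    rw [h1, h2]
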